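-- pv_equiv track=rewrite | github.com/namemechan/NAI-Tag-Viewer | prompt_converter.py | count_after
-- ===== SOURCE A (Python) =====
-- def count_after(text, pos, target, stopper):
--     """
--     Count occurrences of target character to the right of pos,
--     stopping at stopper character
--     """
--     count = 0
--     i = pos + 1
--     while i < len(text):
--         if text[i] == stopper:
--             break
--         if text[i] == target:
--             count += 1
--         i += 1
--     return count
-- ===== SOURCE B (Python) =====
-- def count_after(text, pos, target, stopper):
--     chars = list(text[pos + 1:])
--     if stopper in chars:
--         chars = chars[:chars.index(stopper)]
--     return chars.count(target)
-- ===== Notes on version B (the rewrite author's own statement) =====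
-- stated objective: idiomatic
-- what changed: A's single fused loop that simultaneously tests for the stopper and counts the target is replaced by a two-phase decomposition: slice the tail once, cut it at the first stopper found by a membership test + index, then count the target in the bounded segment with list.count. (constant-factor: slicing and list.index/list.count run in C instead of a per-character Python loop; measured ~2-3.5x).
-- outside the precondition, e.g. on count_after('aa', -3, 'a', 'z'): A returns 4, B returns 2
import Mathlib
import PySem

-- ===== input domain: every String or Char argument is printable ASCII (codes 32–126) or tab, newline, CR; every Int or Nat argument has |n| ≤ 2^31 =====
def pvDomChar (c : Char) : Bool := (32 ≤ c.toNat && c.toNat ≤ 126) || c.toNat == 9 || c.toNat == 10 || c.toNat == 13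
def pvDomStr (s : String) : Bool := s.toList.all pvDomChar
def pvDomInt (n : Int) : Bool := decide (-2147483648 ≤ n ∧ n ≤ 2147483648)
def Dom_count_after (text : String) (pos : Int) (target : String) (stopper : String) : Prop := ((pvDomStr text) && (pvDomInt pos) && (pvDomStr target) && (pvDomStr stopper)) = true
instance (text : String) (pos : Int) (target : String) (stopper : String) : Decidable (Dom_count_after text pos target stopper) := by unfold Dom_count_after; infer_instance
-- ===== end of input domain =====

-- B replaces A's fused scan (test stopper and count target in one loop) by a two-phase
-- decomposition: slice the tail once, cut it at the first stopper, then count (idiomatic).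

-- ===== PORT A =====
-- the while loop: fuel = number of remaining iterations len(text) - i; text[i] is the
-- 1-char string String.ofList [c]; pyGet? = none is Python's IndexError (excluded by Pre_)
def count_after_go (text : String) (target : String) (stopper : String) :
    Nat → Int → Int → Int
  | 0, _, count => count
  | fuel + 1, i, count =>
    match PySem.Str.pyGet? text i with
    | none => count
    | some c =>
      if String.ofList [c] == stopper then count
      else count_after_go text target stopper fuel (i + 1)
            (if String.ofList [c] == target then count + 1 else count)

def count_after (text : String) (pos : Int) (target : String) (stopper : String) : Int :=
  count_after_go text target stopper (PySem.Str.len text - (pos + 1)).toNat (pos + 1) 0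

-- ===== PORT B =====
-- Source B: chars = list(text[pos+1:]) (a list of 1-char strings); cut at chars.index(stopper)
-- when `stopper in chars`; return chars.count(target)
def count_after_alt (text : String) (pos : Int) (target : String) (stopper : String) : Int :=
  let chars := (PySem.List.slice text.toList (some (pos + 1)) none).map (fun c => String.ofList [c])
  let chars2 :=
    if chars.contains stopper then
      match PySem.List.index? chars stopper with
      | some j => PySem.List.slice chars none (some (j : Int))
      | none => chars      -- unreachable: guarded by the membership test
    else chars
  (PySem.List.count chars2 target : Int)

-- ===== PRECONDITION & SPEC =====
-- Pre_ restricts pos to the natural domain pos ≥ -1 of a scan position (pos = -1 scans the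
-- whole string); for pos < -1 A either raises IndexError (pos+1 < -len(text)) or applies
-- Python's negative-index wraparound and rescans characters from the start of the string,
-- which no caller of a "count to the right of pos" function would specify.
def Pre_count_after (text : String) (pos : Int) (target : String) (stopper : String) : Prop :=
  -1 ≤ pos
instance (text : String) (pos : Int) (target : String) (stopper : String) : Decidable (Pre_count_after text pos target stopper) := by unfold Pre_count_after; infer_instance

def pvWitness_count_after : String × Int × String × String := ("abc", 0, "a", "b")

def Spec_count_after (text : String) (pos : Int) (target : String) (stopper : String) (out : Int) : Prop := out = count_after_alt text pos target stopper
instance (text : String) (pos : Int) (target : String) (stopper : String) (out : Int) : Decidable (Spec_count_after text pos target stopper out) := by unfold Spec_count_after; infer_instance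

-- ===== CLAIM (what is proved, stated in full; the proofs are below) =====
def Claim_equal_count_after : Prop := ∀ (text : String) (pos : Int) (target : String) (stopper : String), Dom_count_after text pos target stopper → Pre_count_after text pos target stopper → Spec_count_after text pos target stopper (count_after text pos target stopper)

-- ===== LEMMAS AND PROOFS =====

-- A's loop at the level of the list of remaining 1-char strings
def listGo (target stopper : String) : List String → Int → Int
  | [], c => c
  | x :: xs, c =>
    if x == stopper then c
    else listGo target stopper xs (if x == target then c + 1 else c)

-- bridge: the index/fuel loop of port A is listGo on the mapped suffix
theorem go_eq_listGo (text : String) (target stopper : String) :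
    ∀ (n : Nat) (c : Int),
      count_after_go text target stopper (text.toList.length - n) (n : Int) c
        = listGo target stopper ((text.toList.drop n).map (fun ch => String.ofList [ch])) c := by
  intro n
  induction hfuel : text.toList.length - n generalizing n with
  | zero =>
    intro c
    have hn : text.toList.length ≤ n := by omega
    simp [count_after_go, List.drop_eq_nil_of_le hn, listGo]
  | succ fuel ih =>
    intro c
    have hn : n < text.toList.length := by omega
    have hdrop : text.toList.drop n = text.toList[n] :: text.toList.drop (n + 1) :=
      List.drop_eq_getElem_cons hn
    have hget : PySem.Str.pyGet? text (n : Int) = some text.toList[n] := by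
      simp [List.getElem?_eq_getElem, hn]
    rw [count_after_go, hget, hdrop, List.map_cons]
    by_cases hstop : (String.ofList [text.toList[n]] == stopper) = true
    · simp [listGo, hstop]
    · have hcast : (n : Int) + 1 = ((n + 1 : Nat) : Int) := by push_cast; ring
      have hf : text.toList.length - (n + 1) = fuel := by omega
      simp only [listGo, hstop, Bool.false_eq_true, if_false, hcast, hf]
      exact ih (n + 1) hf _

-- the list-level equivalence: fused scan = cut-then-count
theorem listGo_eq_cut_count (target stopper : String) :
    ∀ (l : List String) (c : Int),
      listGo target stopper l c
        = c + (PySem.List.count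
            (if l.contains stopper then
              match PySem.List.index? l stopper with
              | some j => PySem.List.slice l none (some (j : Int))
              | none => l
            else l) target : Int) := by
  intro l
  induction l with
  | nil => intro c; simp [listGo, PySem.List.count]
  | cons x xs ih =>
    intro c
    by_cases hstop : x = stopper
    · subst hstop
      simp only [PySem.List.index?_cons_self, List.contains_cons, beq_self_eq_true,
        Bool.true_or, if_true, PySem.List.slice_to_natCast]
      simp [listGo, PySem.List.count]
    · have hbeq : (x == stopper) = false := by simp [hstop]
      have hidx := PySem.List.index?_cons_of_ne (v := stopper) (xs := xs) hstop
      by_cases hmem : stopper ∈ xs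
      · obtain ⟨j, hj⟩ := Option.isSome_iff_exists.mp
          (PySem.List.index?_isSome_iff (xs := xs) (v := stopper) |>.2 hmem)
        have hcont : (x :: xs).contains stopper = true := by simp [hmem]
        have hcontxs : xs.contains stopper = true := by simp [hmem]
        rw [listGo, hbeq]
        simp only [Bool.false_eq_true, if_false]
        rw [ih, hcont, hcontxs, hidx, hj]
        simp only [Option.map_some, if_true]
        rw [PySem.List.slice_to_natCast, PySem.List.slice_to_natCast, List.take_succ_cons]
        by_cases htgt : x = target
        · subst htgt; simp [PySem.List.count, List.count_cons]; ring
        · simp [PySem.List.count, List.count_cons, htgt, Ne.symm htgt]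
      · have hcont : (x :: xs).contains stopper = false := by
          simp [hmem]
          exact fun h => hstop h.symm
        have hcontxs : xs.contains stopper = false := by simp [hmem]
        rw [listGo, hbeq]
        simp only [Bool.false_eq_true, if_false]
        rw [ih, hcont, hcontxs]
        simp only [Bool.false_eq_true, if_false]
        by_cases htgt : x = target
        · subst htgt; simp [PySem.List.count, List.count_cons]; ring
        · simp [PySem.List.count, List.count_cons, htgt, Ne.symm htgt]

-- ===== VERDICT (by name: the statement is the Claim_ definition above) =====
theorem count_after_spec : Claim_equal_count_after := by
  intro text pos target stopper _ hpre
  unfold Spec_count_after count_after count_after_alt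
  have hpos : 0 ≤ pos + 1 := by unfold Pre_count_after at hpre; omega
  obtain ⟨n, hn⟩ : ∃ n : Nat, pos + 1 = (n : Int) := ⟨(pos + 1).toNat, by omega⟩
  rw [hn]
  have hfuel : (PySem.Str.len text - (n : Int)).toNat = text.toList.length - n := by
    simp [PySem.Str.len_eq]
  rw [hfuel, PySem.List.slice_from_natCast, go_eq_listGo, listGo_eq_cut_count]
  ring
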